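-- pv_equiv track=rewrite | github.com/aapope/TerrainGeneration | Road.py | find_route
-- ===== SOURCE A (Python) =====
-- def find_route(bx, ex, by, ey, axis, heights):
--     #within 5
--     sizel = 5
--     left = False
--     right = False
--     points = []
--     if axis == "y":
--         currx = bx
--         for y in range(ey):
--             if currx - ex > 0: #end x is to the left of currx
--                 currx -= 1
--             elif currx - ex < 0:#end x is to the right of currx
--                 currx += 1
--
--             points.append((currx,y))
--
--     return points
-- ===== SOURCE B (Python) =====
-- def find_route(bx, ex, by, ey, axis, heights):
--     if axis != "y":
--         return []
--     sign = 0 if ex == bx else (1 if ex > bx else -1)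
--     dist = abs(bx - ex)
--     return [(bx + sign * min(y + 1, dist), y) for y in range(ey)]
-- ===== Notes on version B (the rewrite author's own statement) =====
-- stated objective: simpler
-- what changed: Replaced the stateful step-by-step walk (mutating currx each row) with a single comprehension using a closed form: x at row y is bx + sign*min(y+1, |bx-ex|).
import Mathlib
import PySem

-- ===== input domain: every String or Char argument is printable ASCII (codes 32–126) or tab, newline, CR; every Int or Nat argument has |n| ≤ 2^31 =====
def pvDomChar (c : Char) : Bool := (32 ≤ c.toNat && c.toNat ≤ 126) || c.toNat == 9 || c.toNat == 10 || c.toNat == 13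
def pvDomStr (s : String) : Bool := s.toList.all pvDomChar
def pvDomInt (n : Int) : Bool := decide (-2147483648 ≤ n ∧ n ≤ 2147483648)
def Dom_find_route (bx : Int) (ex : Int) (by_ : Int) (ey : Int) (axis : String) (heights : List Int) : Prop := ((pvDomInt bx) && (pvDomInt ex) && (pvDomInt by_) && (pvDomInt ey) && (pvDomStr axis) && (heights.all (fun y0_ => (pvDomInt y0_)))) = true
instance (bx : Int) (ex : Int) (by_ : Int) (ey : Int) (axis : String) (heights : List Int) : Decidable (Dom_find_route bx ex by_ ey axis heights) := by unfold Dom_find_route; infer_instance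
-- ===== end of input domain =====

-- B replaces A's stateful step-by-step walk with a per-row closed form (simpler, same cost).

-- ===== PORT A =====
-- A walks: each row moves currx one step toward ex (re-testing the sign), then appends (currx, y).
def find_route (bx : Int) (ex : Int) (by_ : Int) (ey : Int) (axis : String) (heights : List Int) : List (Int × Int) :=
  if axis = "y" then
    ((PySem.List.pyRange 0 ey 1).foldl
      (fun (st : Int × List (Int × Int)) y =>
        let currx := if st.1 - ex > 0 then st.1 - 1
                     else if st.1 - ex < 0 then st.1 + 1 else st.1
        (currx, st.2 ++ [(currx, y)])) (bx, [])).2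
  else []

-- ===== PORT B =====
-- B computes each row directly: x = bx + sign * min (y+1) |bx-ex|.
def find_route_alt (bx : Int) (ex : Int) (by_ : Int) (ey : Int) (axis : String) (heights : List Int) : List (Int × Int) :=
  if axis = "y" then
    let sign : Int := if ex = bx then 0 else if ex > bx then 1 else -1
    let dist : Int := |bx - ex|
    (PySem.List.pyRange 0 ey 1).map (fun y => (bx + sign * min (y + 1) dist, y))
  else []

-- ===== PRECONDITION & SPEC =====
def Spec_find_route (bx : Int) (ex : Int) (by_ : Int) (ey : Int) (axis : String) (heights : List Int) (out : List (Int × Int)) : Prop := out = find_route_alt bx ex by_ ey axis heights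
instance (bx : Int) (ex : Int) (by_ : Int) (ey : Int) (axis : String) (heights : List Int) (out : List (Int × Int)) : Decidable (Spec_find_route bx ex by_ ey axis heights out) := by unfold Spec_find_route; infer_instance

-- ===== CLAIM (what is proved, stated in full; the proofs are below) =====
def Claim_equal_find_route : Prop := ∀ (bx : Int) (ex : Int) (by_ : Int) (ey : Int) (axis : String) (heights : List Int), Dom_find_route bx ex by_ ey axis heights → Spec_find_route bx ex by_ ey axis heights (find_route bx ex by_ ey axis heights)

-- ===== LEMMAS AND PROOFS =====

-- one step of A's walk from the closed-form position lands on the next closed-form position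
theorem find_route_step (bx ex : Int) (n : Nat) :
    (let c := bx + (if ex = bx then 0 else if ex > bx then 1 else -1) * min (n : Int) |bx - ex|
     if c - ex > 0 then c - 1 else if c - ex < 0 then c + 1 else c)
    = bx + (if ex = bx then 0 else if ex > bx then 1 else -1) * min ((n : Int) + 1) |bx - ex| := by
  have habs : |bx - ex| = ((bx - ex).natAbs : Int) := Int.abs_eq_natAbs _
  simp only [habs]
  split_ifs <;> omega

-- loop invariant: after n iterations the state is the closed-form position and the mapped prefix
theorem find_route_loop (bx ex : Int) (n : Nat) :
    (PySem.List.pyRange 0 (n : Int) 1).foldl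
      (fun (st : Int × List (Int × Int)) y =>
        let currx := if st.1 - ex > 0 then st.1 - 1
                     else if st.1 - ex < 0 then st.1 + 1 else st.1
        (currx, st.2 ++ [(currx, y)])) (bx, [])
    = (bx + (if ex = bx then 0 else if ex > bx then 1 else -1) * min (n : Int) |bx - ex|,
       (PySem.List.pyRange 0 (n : Int) 1).map
         (fun y => (bx + (if ex = bx then 0 else if ex > bx then 1 else -1) * min (y + 1) |bx - ex|, y))) := by
  induction n with
  | zero =>
      simp [PySem.List.pyRange_one_eq_nil (by omega : (0:Int) ≤ 0)]
  | succ n ih =>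
      have hrng : PySem.List.pyRange 0 ((n : Int) + 1) 1
          = PySem.List.pyRange 0 (n : Int) 1 ++ [(n : Int)] :=
        PySem.List.pyRange_one_succ_right (by omega)
      push_cast
      rw [hrng, List.foldl_append, ih, List.map_append]
      have hstep := find_route_step bx ex n
      simp only [List.foldl_cons, List.foldl_nil, List.map_cons, List.map_nil]
      rw [hstep]

-- ===== VERDICT (by name: the statement is the Claim_ definition above) =====
theorem find_route_spec : Claim_equal_find_route := by
  intro bx ex by_ ey axis heights _
  unfold Spec_find_route find_route find_route_alt
  by_cases hax : axis = "y"
  · simp only [hax, if_true]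
    rcases (by omega : ey ≤ 0 ∨ 0 < ey) with hle | hpos
    · rw [PySem.List.pyRange_one_eq_nil hle]; rfl
    · obtain ⟨n, hn⟩ : ∃ n : Nat, (n : Int) = ey := ⟨ey.toNat, Int.toNat_of_nonneg (le_of_lt hpos)⟩
      rw [← hn, find_route_loop]
  · simp [hax]
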